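-- pv_equiv track=rewrite | github.com/paru-akindo/sumeshi | pages/航路.py | get_populated_ports
-- ===== SOURCE A (Python) =====
-- from typing import Dict, List, Tuple
--
-- def get_populated_ports(prices_cfg: Dict[str, Dict[str,int]], items_cfg: List[Tuple[str,int]], ports: List[str]):
--     populated = []
--     for port in ports:
--         row = prices_cfg.get(port, {})
--         ok = True
--         for name, _ in items_cfg:
--             if name not in row or not isinstance(row[name], (int, float)):
--                 ok = False
--                 break
--         if ok:
--             populated.append(port)
--     return populated
-- ===== SOURCE B (Python) =====
-- def get_populated_ports(prices_cfg, items_cfg, ports):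
--     # Inverted loop order: iterate over required items, successively filtering
--     # the surviving ports; a port survives all rounds iff every item has a
--     # numeric price in its row.
--     survivors = list(ports)
--     for name, _ in items_cfg:
--         survivors = [p for p in survivors
--                      if isinstance(prices_cfg.get(p, {}).get(name), (int, float))]
--     return survivors
-- ===== Notes on version B (the rewrite author's own statement) =====
-- stated objective: alternative
-- what changed: Inverts the loop nesting: instead of scanning all items per port with early break, B iterates over the required items and successively filters the surviving ports, keeping a port iff it survives every round (filter composition preserves input order).
import Mathlib
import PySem

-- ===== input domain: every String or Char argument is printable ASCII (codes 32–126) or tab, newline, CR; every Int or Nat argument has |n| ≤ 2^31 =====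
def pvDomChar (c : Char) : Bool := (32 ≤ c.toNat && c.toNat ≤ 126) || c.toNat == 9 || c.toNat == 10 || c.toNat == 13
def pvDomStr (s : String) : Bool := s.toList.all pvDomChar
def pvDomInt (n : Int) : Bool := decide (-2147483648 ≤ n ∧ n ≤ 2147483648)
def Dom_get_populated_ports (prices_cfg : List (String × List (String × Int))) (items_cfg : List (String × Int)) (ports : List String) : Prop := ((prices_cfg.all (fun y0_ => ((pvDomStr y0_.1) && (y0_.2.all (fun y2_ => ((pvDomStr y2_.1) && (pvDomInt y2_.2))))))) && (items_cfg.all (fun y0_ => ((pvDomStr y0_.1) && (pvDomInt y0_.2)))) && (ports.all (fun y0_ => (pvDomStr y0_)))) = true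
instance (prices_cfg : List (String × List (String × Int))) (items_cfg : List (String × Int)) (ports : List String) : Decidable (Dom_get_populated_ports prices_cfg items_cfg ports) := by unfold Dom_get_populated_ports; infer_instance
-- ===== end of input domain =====

-- B inverts the loop nesting: it iterates over the required items, successively
-- filtering the surviving ports (objective: alternative, same cost).

-- ===== PORT A =====
-- inner loop of A: 'for name, _ in items_cfg: if name not in row or not isinstance(...): ok = False; break'
-- (the isinstance(row[name], (int, float)) test is always true here: values are Int)
def pvAok (items_cfg : List (String × Int)) (row : PySem.Dict String Int) : Bool :=
  match items_cfg with
  | [] => true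
  | (name, _) :: rest => if PySem.Dict.contains row name then pvAok rest row else false

def get_populated_ports (prices_cfg : List (String × List (String × Int))) (items_cfg : List (String × Int)) (ports : List String) : List String :=
  ports.foldl (fun populated port =>
    let row : PySem.Dict String Int := PySem.Dict.mk ((PySem.Dict.mk prices_cfg).getD port [])
    if pvAok items_cfg row then populated ++ [port] else populated) []

-- ===== PORT B =====
-- 'isinstance(prices_cfg.get(p, {}).get(name), (int, float))' is true exactly when
-- the lookup yields a value (values are Int), i.e. get? is some.
def get_populated_ports_alt (prices_cfg : List (String × List (String × Int))) (items_cfg : List (String × Int)) (ports : List String) : List String :=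
  items_cfg.foldl (fun survivors nv =>
    survivors.filter (fun p =>
      ((PySem.Dict.mk ((PySem.Dict.mk prices_cfg).getD p [])).get? nv.1).isSome)) ports

-- ===== PRECONDITION & SPEC =====
def Spec_get_populated_ports (prices_cfg : List (String × List (String × Int))) (items_cfg : List (String × Int)) (ports : List String) (out : List String) : Prop := out = get_populated_ports_alt prices_cfg items_cfg ports
instance (prices_cfg : List (String × List (String × Int))) (items_cfg : List (String × Int)) (ports : List String) (out : List String) : Decidable (Spec_get_populated_ports prices_cfg items_cfg ports out) := by unfold Spec_get_populated_ports; infer_instance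

-- ===== CLAIM (what is proved, stated in full; the proofs are below) =====
def Claim_equal_get_populated_ports : Prop := ∀ (prices_cfg : List (String × List (String × Int))) (items_cfg : List (String × Int)) (ports : List String), Dom_get_populated_ports prices_cfg items_cfg ports → Spec_get_populated_ports prices_cfg items_cfg ports (get_populated_ports prices_cfg items_cfg ports)

-- ===== LEMMAS AND PROOFS =====

-- A's inner loop succeeds iff every required name is a key of the row.
theorem pvAok_eq_all (items_cfg : List (String × Int)) (row : PySem.Dict String Int) :
    pvAok items_cfg row = items_cfg.all (fun nv => (PySem.Dict.get? row nv.1).isSome) := by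
  induction items_cfg with
  | nil => simp [pvAok]
  | cons hd tl ih =>
    obtain ⟨name, v⟩ := hd
    by_cases h : PySem.Dict.contains row name = true
    · rw [PySem.Dict.contains_eq_isSome_get?] at h
      simp [pvAok, PySem.Dict.contains_eq_isSome_get?, h, ih]
    · simp only [Bool.not_eq_true] at h
      rw [PySem.Dict.contains_eq_isSome_get?] at h
      simp [pvAok, PySem.Dict.contains_eq_isSome_get?, h]

-- a fold of filters is the filter by the conjunction of all the tests
theorem foldl_filter_eq_filter_all {α β : Type} (f : β → α → Bool) (L : List β) (s : List α) :
    L.foldl (fun acc b => acc.filter (f b)) s = s.filter (fun a => L.all (fun b => f b a)) := by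
  induction L generalizing s with
  | nil => simp
  | cons hd tl ih =>
    simp only [List.foldl_cons, ih, List.filter_filter, List.all_cons]
    apply List.filter_congr
    intro a _
    rw [Bool.and_comm]

-- ===== VERDICT (by name: the statement is the Claim_ definition above) =====
theorem get_populated_ports_spec : Claim_equal_get_populated_ports := by
  intro prices_cfg items_cfg ports _
  unfold Spec_get_populated_ports get_populated_ports get_populated_ports_alt
  rw [PySem.List.foldl_append_if_eq_filter, foldl_filter_eq_filter_all]
  simp only [List.nil_append]
  apply List.filter_congr
  intro port _
  exact pvAok_eq_all _ _
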